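-- pv_equiv track=rewrite | github.com/mirmir93/projet_complexit-_amir_idris | algorithms/genetic.py | simuler_chemin
-- ===== SOURCE A (Python) =====
-- def est_valide(x, y, grid):
--     return 0 <= y < len(grid) and 0 <= x < len(grid[y]) and grid[y][x] != 'X'
--
-- def simuler_chemin(individu, grid, start, goal):
--     x, y = start
--     chemin = [(x, y)]
--     for dx, dy in individu:
--         nx, ny = x + dx, y + dy
--         if est_valide(nx, ny, grid):
--             x, y = nx, ny
--         chemin.append((x, y))
--         if (x, y) == goal:
--             break
--     return chemin
-- ===== SOURCE B (Python) =====
-- def est_valide(x, y, grid):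
--     return 0 <= y < len(grid) and 0 <= x < len(grid[y]) and grid[y][x] != 'X'
--
-- def _step(pos, move, grid):
--     nx, ny = pos[0] + move[0], pos[1] + move[1]
--     return (nx, ny) if est_valide(nx, ny, grid) else pos
--
-- def simuler_chemin(individu, grid, start, goal):
--     # full trajectory scan, then truncate at the first goal hit after the start
--     traj = [tuple(start)]
--     for mv in individu:
--         traj.append(_step(traj[-1], mv, grid))
--     tail = traj[1:]
--     if goal in tail:
--         return traj[:tail.index(goal) + 2]
--     return traj
-- ===== Notes on version B (the rewrite author's own statement) =====
-- stated objective: alternative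
-- what changed: A interleaves moving, recording and the goal test in one loop with an early break; B first builds the full trajectory by a scan over the moves and then truncates it at the first occurrence of the goal after the start position.
import Mathlib
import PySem

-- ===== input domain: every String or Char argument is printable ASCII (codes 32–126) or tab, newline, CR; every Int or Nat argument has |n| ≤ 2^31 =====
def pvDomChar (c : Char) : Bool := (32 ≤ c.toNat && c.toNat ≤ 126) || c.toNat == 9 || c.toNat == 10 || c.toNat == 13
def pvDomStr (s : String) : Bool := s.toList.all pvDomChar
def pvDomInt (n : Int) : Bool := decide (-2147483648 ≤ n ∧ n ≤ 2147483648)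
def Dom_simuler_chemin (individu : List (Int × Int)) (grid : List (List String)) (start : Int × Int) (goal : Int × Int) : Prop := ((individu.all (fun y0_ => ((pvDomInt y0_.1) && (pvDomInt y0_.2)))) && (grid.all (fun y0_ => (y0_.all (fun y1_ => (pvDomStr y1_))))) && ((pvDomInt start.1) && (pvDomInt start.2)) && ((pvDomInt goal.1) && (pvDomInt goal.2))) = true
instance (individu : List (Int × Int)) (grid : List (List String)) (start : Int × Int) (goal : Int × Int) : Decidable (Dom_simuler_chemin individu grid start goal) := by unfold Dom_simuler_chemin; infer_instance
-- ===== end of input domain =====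

-- ===== PORT A =====
-- B changes the decomposition: one fused guarded loop with break (A) vs a full
-- trajectory scan followed by a first-goal-after-start truncation (B); objective: alternative.
def est_valide (x y : Int) (grid : List (List String)) : Bool :=
  decide (0 ≤ y) && decide (y < (grid.length : Int)) &&
    (let row := (PySem.List.pyGet? grid y).getD []
     decide (0 ≤ x) && decide (x < (row.length : Int)) &&
       ((PySem.List.pyGet? row x).getD "" != "X"))

-- the 'for dx, dy in individu' loop of A, with its early 'break'
def simuler_go (grid : List (List String)) (goal : Int × Int) :
    List (Int × Int) → (Int × Int) → List (Int × Int)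
  | [], _ => []
  | (dx, dy) :: rest, (x, y) =>
    let nx := x + dx
    let ny := y + dy
    let p := if est_valide nx ny grid then (nx, ny) else (x, y)
    if p = goal then [p] else p :: simuler_go grid goal rest p

def simuler_chemin (individu : List (Int × Int)) (grid : List (List String)) (start : Int × Int) (goal : Int × Int) : List (Int × Int) :=
  start :: simuler_go grid goal individu start

-- ===== PORT B =====
def pvStep (pos move : Int × Int) (grid : List (List String)) : Int × Int :=
  let nx := pos.1 + move.1
  let ny := pos.2 + move.2
  if est_valide nx ny grid then (nx, ny) else pos

-- B's scan: the full trajectory after the start position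
def pvScan (grid : List (List String)) : List (Int × Int) → (Int × Int) → List (Int × Int)
  | [], _ => []
  | m :: rest, pos =>
    let p := pvStep pos m grid
    p :: pvScan grid rest p

def simuler_chemin_alt (individu : List (Int × Int)) (grid : List (List String)) (start : Int × Int) (goal : Int × Int) : List (Int × Int) :=
  let traj := start :: pvScan grid individu start
  let tail := traj.drop 1
  match PySem.List.index? tail goal with
  | some i => traj.take (i + 2)
  | none => traj

-- ===== PRECONDITION & SPEC =====
def Spec_simuler_chemin (individu : List (Int × Int)) (grid : List (List String)) (start : Int × Int) (goal : Int × Int) (out : List (Int × Int)) : Prop := out = simuler_chemin_alt individu grid start goal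
instance (individu : List (Int × Int)) (grid : List (List String)) (start : Int × Int) (goal : Int × Int) (out : List (Int × Int)) : Decidable (Spec_simuler_chemin individu grid start goal out) := by unfold Spec_simuler_chemin; infer_instance

-- ===== CLAIM (what is proved, stated in full; the proofs are below) =====
def Claim_equal_simuler_chemin : Prop := ∀ (individu : List (Int × Int)) (grid : List (List String)) (start : Int × Int) (goal : Int × Int), Dom_simuler_chemin individu grid start goal → Spec_simuler_chemin individu grid start goal (simuler_chemin individu grid start goal)

-- ===== LEMMAS AND PROOFS =====
theorem go_eq_scan_trunc (grid : List (List String)) (goal : Int × Int)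
    (moves : List (Int × Int)) (pos : Int × Int) :
    simuler_go grid goal moves pos =
      (match PySem.List.index? (pvScan grid moves pos) goal with
       | some i => (pvScan grid moves pos).take (i + 1)
       | none => pvScan grid moves pos) := by
  induction moves generalizing pos with
  | nil => simp [simuler_go, pvScan, PySem.List.index?]
  | cons m rest ih =>
    obtain ⟨dx, dy⟩ := m
    obtain ⟨x, y⟩ := pos
    have hstep : pvStep (x, y) (dx, dy) grid =
        (if est_valide (x + dx) (y + dy) grid then (x + dx, y + dy) else (x, y)) := by
      simp [pvStep]
    simp only [simuler_go, pvScan, hstep]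
    set p := (if est_valide (x + dx) (y + dy) grid then (x + dx, y + dy) else (x, y)) with hp
    by_cases hgoal : p = goal
    · subst hgoal
      rw [PySem.List.index?_cons_self]
      simp
    · rw [if_neg hgoal, PySem.List.index?_cons_of_ne (xs := pvScan grid rest p) hgoal]
      rw [ih p]
      cases h : PySem.List.index? (pvScan grid rest p) goal with
      | none => simp
      | some i => simp [List.take_succ_cons]

-- ===== VERDICT (by name: the statement is the Claim_ definition above) =====
theorem simuler_chemin_spec : Claim_equal_simuler_chemin := by
  intro individu grid start goal _
  unfold Spec_simuler_chemin simuler_chemin simuler_chemin_alt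
  simp only [List.drop_succ_cons, List.drop_zero]
  rw [go_eq_scan_trunc]
  cases h : PySem.List.index? (pvScan grid individu start) goal with
  | none => simp
  | some i => simp [List.take_succ_cons]
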